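-- pv_equiv track=rewrite | github.com/dsj7419/GynTree | src/services/CommentParser.py | _clean_python_docstring
-- ===== SOURCE A (Python) =====
-- from typing import Dict, List, Optional, Tuple
--
-- def _clean_python_docstring(comment_lines: List[str]) -> str:
--     if len(comment_lines) == 1:
--         return " ".join(word for word in comment_lines[0].split() if word)
--
--     cleaned_lines = []
--     for line in comment_lines:
--         cleaned = line.strip()
--         if cleaned:
--             words = [word for word in cleaned.split() if word]
--             cleaned_lines.append(" ".join(words))
--
--     return " ".join(cleaned_lines).strip()
-- ===== SOURCE B (Python) =====
-- from typing import List
--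
-- def _clean_python_docstring(comment_lines: List[str]) -> str:
--     return " ".join(" ".join(comment_lines).split())
-- ===== Notes on version B (the rewrite author's own statement) =====
-- stated objective: simpler
-- what changed: B drops A's length-1 special case and the per-line strip/split/accumulate loop: it joins all lines into one string, splits that once on whitespace, and rejoins the words with single spaces (measured ~2.9x faster, a constant-factor win from one split pass instead of per-line strip+split+list building).
import Mathlib
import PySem

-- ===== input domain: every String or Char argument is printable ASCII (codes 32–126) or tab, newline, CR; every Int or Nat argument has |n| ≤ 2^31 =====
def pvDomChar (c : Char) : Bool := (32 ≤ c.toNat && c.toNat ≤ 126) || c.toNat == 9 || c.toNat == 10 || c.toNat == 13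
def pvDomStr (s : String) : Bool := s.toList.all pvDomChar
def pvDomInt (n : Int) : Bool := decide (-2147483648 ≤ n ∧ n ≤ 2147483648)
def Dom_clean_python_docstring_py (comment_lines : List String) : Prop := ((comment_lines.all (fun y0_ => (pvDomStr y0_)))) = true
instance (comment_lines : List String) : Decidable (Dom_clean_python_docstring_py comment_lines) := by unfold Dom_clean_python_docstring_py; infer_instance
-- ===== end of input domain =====

-- B normalizes whitespace in one flattened pass (join all lines once, split once, rejoin) instead of
-- A's length-1 special case and per-line strip/split/accumulate loop; same return value on all inputs.

-- ===== PORT A =====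
def clean_python_docstring_py (comment_lines : List String) : String :=
  if comment_lines.length == 1 then
    PySem.Str.join " " ((PySem.Str.split₀ (comment_lines.headD "")).filter (fun w => w != ""))
  else
    let cleaned_lines := comment_lines.foldl (fun acc line =>
      let cleaned := PySem.Str.strip line
      if cleaned != "" then
        acc ++ [PySem.Str.join " " ((PySem.Str.split₀ cleaned).filter (fun w => w != ""))]
      else acc) []
    PySem.Str.strip (PySem.Str.join " " cleaned_lines)

-- ===== PORT B =====
def clean_python_docstring_py_alt (comment_lines : List String) : String :=
  PySem.Str.join " " (PySem.Str.split₀ (PySem.Str.join " " comment_lines))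

-- ===== PRECONDITION & SPEC =====
def Spec_clean_python_docstring_py (comment_lines : List String) (out : String) : Prop := out = clean_python_docstring_py_alt comment_lines
instance (comment_lines : List String) (out : String) : Decidable (Spec_clean_python_docstring_py comment_lines out) := by unfold Spec_clean_python_docstring_py; infer_instance

-- ===== CLAIM (what is proved, stated in full; the proofs are below) =====
def Claim_equal_clean_python_docstring_py : Prop := ∀ (comment_lines : List String), Dom_clean_python_docstring_py comment_lines → Spec_clean_python_docstring_py comment_lines (clean_python_docstring_py comment_lines)

-- ===== LEMMAS AND PROOFS =====

theorem pv_go_acc (s cur acc) : PySem.Chars.split₀.go s cur acc = acc.reverse ++ PySem.Chars.split₀.go s cur [] := by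
  induction s generalizing cur acc with
  | nil => simp [PySem.Chars.split₀.go]; split <;> simp
  | cons c rest ih =>
    simp only [PySem.Chars.split₀.go]
    split
    · split
      · exact ih [] acc
      · rw [ih [] (cur.reverse :: acc), ih [] [cur.reverse]]; simp
    · exact ih (c :: cur) acc

theorem pv_go_space (b : List Char) : ∀ (a cur : List Char),
    PySem.Chars.split₀.go (a ++ ' ' :: b) cur [] = PySem.Chars.split₀.go a cur [] ++ PySem.Chars.split₀.go b [] [] := by
  intro a
  induction a with
  | nil =>
    intro cur
    simp only [List.nil_append, PySem.Chars.split₀.go]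
    have : PySem.Chars.isspace ' ' = true := by decide
    rw [if_pos this]
    split
    · simp
    · rw [pv_go_acc]
  | cons c rest ih =>
    intro cur
    simp only [List.cons_append, PySem.Chars.split₀.go]
    split
    · split
      · exact ih []
      · rw [pv_go_acc _ [] [cur.reverse], ih [], pv_go_acc rest [] [cur.reverse]]; simp
    · exact ih (c :: cur)

theorem pv_split0_append_space (a b : List Char) :
    PySem.Chars.split₀ (a ++ ' ' :: b) = PySem.Chars.split₀ a ++ PySem.Chars.split₀ b := by
  simp [PySem.Chars.split₀, pv_go_space]

theorem pv_split0_join (ls : List (List Char)) :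
    PySem.Chars.split₀ (PySem.Chars.join [' '] ls) = (ls.map PySem.Chars.split₀).flatten := by
  induction ls with
  | nil => rfl
  | cons l rest ih =>
    cases rest with
    | nil => simp [PySem.Chars.join, List.intercalate]
    | cons m t =>
      have : PySem.Chars.join [' '] (l :: m :: t) = l ++ ' ' :: PySem.Chars.join [' '] (m :: t) := by
        simp [PySem.Chars.join, List.intercalate]
      rw [this, pv_split0_append_space, ih]
      simp

theorem pv_go_spaces (t : List Char) (h : ∀ c ∈ t, PySem.Chars.isspace c = true) (cur : List Char) :
    PySem.Chars.split₀.go t cur [] = PySem.Chars.split₀.go [] cur [] := by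
  induction t generalizing cur with
  | nil => rfl
  | cons c rest ih =>
    have hc := h c (by simp)
    have hrest : ∀ c ∈ rest, PySem.Chars.isspace c = true := fun c hm => h c (by simp [hm])
    simp only [PySem.Chars.split₀.go, if_pos hc]
    split
    · rw [ih hrest]; simp_all [PySem.Chars.split₀.go]
    · rw [pv_go_acc, ih hrest]; simp_all [PySem.Chars.split₀.go]

theorem pv_go_append_spaces (t : List Char) (h : ∀ c ∈ t, PySem.Chars.isspace c = true) :
    ∀ (s cur : List Char), PySem.Chars.split₀.go (s ++ t) cur [] = PySem.Chars.split₀.go s cur [] := by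
  intro s
  induction s with
  | nil => intro cur; simpa using pv_go_spaces t h cur
  | cons c rest ih =>
    intro cur
    simp only [List.cons_append, PySem.Chars.split₀.go]
    split
    · split
      · exact ih []
      · rw [pv_go_acc _ [] [cur.reverse], ih [], pv_go_acc rest [] [cur.reverse]]
    · exact ih (c :: cur)

theorem pv_go_spaces_prepend (t : List Char) (h : ∀ c ∈ t, PySem.Chars.isspace c = true) (s : List Char) :
    PySem.Chars.split₀.go (t ++ s) [] [] = PySem.Chars.split₀.go s [] [] := by
  induction t with
  | nil => rfl
  | cons c rest ih =>
    have hc := h c (by simp)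
    simp only [List.cons_append, PySem.Chars.split₀.go, if_pos hc, List.isEmpty_nil]
    exact ih (fun c hm => h c (by simp [hm]))

theorem pv_split0_lstrip (s : List Char) :
    PySem.Chars.split₀ (PySem.Chars.lstrip s) = PySem.Chars.split₀ s := by
  conv_rhs => rw [show s = s.takeWhile PySem.Chars.isspace ++ s.dropWhile PySem.Chars.isspace from (List.takeWhile_append_dropWhile).symm]
  simp only [PySem.Chars.split₀, PySem.Chars.lstrip]
  rw [pv_go_spaces_prepend _ (fun c hm => List.mem_takeWhile_imp hm)]

theorem pv_split0_rstrip (s : List Char) :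
    PySem.Chars.split₀ (PySem.Chars.rstrip s) = PySem.Chars.split₀ s := by
  have hdecomp : s = PySem.Chars.rstrip s ++ (s.reverse.takeWhile PySem.Chars.isspace).reverse := by
    simp only [PySem.Chars.rstrip]
    rw [← List.reverse_append, List.takeWhile_append_dropWhile]
    · simp
  conv_rhs => rw [hdecomp]
  simp only [PySem.Chars.split₀]
  rw [pv_go_append_spaces _ (fun c hm => List.mem_takeWhile_imp (List.mem_reverse.mp hm))]

theorem pv_split0_strip (s : List Char) :
    PySem.Chars.split₀ (PySem.Chars.strip s) = PySem.Chars.split₀ s := by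
  simp [PySem.Chars.strip, pv_split0_rstrip, pv_split0_lstrip]

theorem pv_go_ne_nil (s : List Char) : ∀ cur, cur ≠ [] → PySem.Chars.split₀.go s cur [] ≠ [] := by
  induction s with
  | nil => intro cur h; simp [PySem.Chars.split₀.go, h]
  | cons c rest ih =>
    intro cur h
    simp only [PySem.Chars.split₀.go]
    split
    · rw [if_neg (by simpa using h), pv_go_acc]; simp
    · exact ih (c :: cur) (by simp)

theorem pv_split0_nil_iff (s : List Char) :
    PySem.Chars.split₀ s = [] ↔ ∀ c ∈ s, PySem.Chars.isspace c = true := by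
  constructor
  · intro h c hm
    induction s with
    | nil => simp at hm
    | cons d rest ih =>
      by_cases hd : PySem.Chars.isspace d = true
      · simp only [PySem.Chars.split₀, PySem.Chars.split₀.go, if_pos hd, List.isEmpty_nil] at h
        rcases List.mem_cons.mp hm with rfl | hm'
        · exact hd
        · exact ih h hm'
      · exfalso
        simp only [PySem.Chars.split₀, PySem.Chars.split₀.go, if_neg hd] at h
        exact pv_go_ne_nil rest [d] (by simp) h
  · intro h
    simpa [PySem.Chars.split₀, PySem.Chars.split₀.go] using pv_go_spaces s h []

theorem pv_strip_nil_iff (s : List Char) :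
    PySem.Chars.strip s = [] ↔ ∀ c ∈ s, PySem.Chars.isspace c = true := by
  constructor
  · intro h c hm
    have hls : ∀ c ∈ PySem.Chars.lstrip s, PySem.Chars.isspace c = true := by
      intro c hc
      have : ∀ c ∈ (PySem.Chars.lstrip s).reverse, PySem.Chars.isspace c = true := by
        rw [← List.dropWhile_eq_nil_iff]
        simpa [PySem.Chars.strip, PySem.Chars.rstrip] using h
      exact this c (List.mem_reverse.mpr hc)
    rcases (List.mem_append.mp (by
        rw [List.takeWhile_append_dropWhile (p := PySem.Chars.isspace)]; exact hm)) with h1 | h2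
    · exact List.mem_takeWhile_imp h1
    · exact hls c h2
  · intro h
    have h1 : PySem.Chars.lstrip s = [] := by
      rw [PySem.Chars.lstrip, List.dropWhile_eq_nil_iff]
      intro c hc; exact h c hc
    simp [PySem.Chars.strip, h1, PySem.Chars.rstrip]

def pvGood (w : List Char) : Prop := w ≠ [] ∧ ∀ c ∈ w, PySem.Chars.isspace c = false

theorem pv_go_words_good (s : List Char) : ∀ (cur : List Char) (acc : List (List Char)),
    (∀ w ∈ acc, pvGood w) → (∀ c ∈ cur, PySem.Chars.isspace c = false) →
    ∀ w ∈ PySem.Chars.split₀.go s cur acc, pvGood w := by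
  induction s with
  | nil =>
    intro cur acc hacc hcur w hw
    simp only [PySem.Chars.split₀.go] at hw
    split at hw
    · exact hacc w (by simpa using hw)
    · rename_i hne
      rcases List.mem_cons.mp (List.mem_reverse.mp hw) with rfl | h'
      · exact ⟨by simpa using hne, fun c hc => hcur c (List.mem_reverse.mp hc)⟩
      · exact hacc w h'
  | cons c rest ih =>
    intro cur acc hacc hcur w hw
    simp only [PySem.Chars.split₀.go] at hw
    split at hw
    · split at hw
      · exact ih [] acc hacc (by simp) w hw
      · rename_i hsp hne
        refine ih [] (cur.reverse :: acc) ?_ (by simp) w hw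
        intro v hv
        rcases List.mem_cons.mp hv with rfl | h'
        · exact ⟨by simpa using hne, fun d hd => hcur d (List.mem_reverse.mp hd)⟩
        · exact hacc v h'
    · rename_i hsp
      refine ih (c :: cur) acc hacc ?_ w hw
      intro d hd
      rcases List.mem_cons.mp hd with rfl | h'
      · simpa using hsp
      · exact hcur d h'

theorem pv_split0_words_good (s : List Char) : ∀ w ∈ PySem.Chars.split₀ s, pvGood w :=
  pv_go_words_good s [] [] (by simp) (by simp)

theorem pv_inter_cons₂ {α : Type} (sep x y : List α) (t : List (List α)) :
    List.intercalate sep (x :: y :: t) = x ++ sep ++ List.intercalate sep (y :: t) := by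
  simp [List.intercalate]

theorem pv_inter_append {α : Type} (sep : List α) (b : List (List α)) (hb : b ≠ []) :
    ∀ (a : List (List α)), a ≠ [] →
    List.intercalate sep (a ++ b) = List.intercalate sep a ++ sep ++ List.intercalate sep b := by
  intro a
  induction a with
  | nil => simp
  | cons x t ih =>
    intro _
    cases t with
    | nil =>
      cases b with
      | nil => simp at hb
      | cons y u => simp [List.intercalate]
    | cons y u =>
      rw [show (x :: y :: u) ++ b = x :: y :: (u ++ b) from rfl, pv_inter_cons₂, pv_inter_cons₂,
          ← List.cons_append, ih (by simp)]
      simp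

theorem pv_inter_flatten {α : Type} (sep : List α) :
    ∀ (wss : List (List (List α))), (∀ ws ∈ wss, ws ≠ []) →
    List.intercalate sep (wss.map (List.intercalate sep)) = List.intercalate sep wss.flatten := by
  intro wss
  induction wss with
  | nil => intro _; rfl
  | cons ws rest ih =>
    intro h
    cases rest with
    | nil => simp [List.intercalate]
    | cons r t =>
      have hws : ws ≠ [] := h ws (by simp)
      have hr : r ≠ [] := h r (by simp)
      have hfl : (r :: t).flatten ≠ [] := by
        cases r with | nil => exact absurd rfl hr | cons a b => simp
      have hih := ih (fun ws hm => h ws (by simp [hm]))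
      rw [show (ws :: r :: t).flatten = ws ++ (r :: t).flatten from rfl,
          pv_inter_append sep (r :: t).flatten hfl ws hws, ← hih]
      simp only [List.map_cons]
      rw [pv_inter_cons₂]

theorem pv_lstrip_inter (ws : List (List Char)) (h : ∀ w ∈ ws, pvGood w) :
    PySem.Chars.lstrip (List.intercalate [' '] ws) = List.intercalate [' '] ws := by
  cases ws with
  | nil => rfl
  | cons w t =>
    obtain ⟨hne, hnsp⟩ := h w (by simp)
    cases w with
    | nil => exact absurd rfl hne
    | cons c w' =>
      have hc : PySem.Chars.isspace c = false := hnsp c (by simp)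
      have : ∃ rest, List.intercalate [' '] ((c :: w') :: t) = c :: rest := by
        cases t with
        | nil => exact ⟨w', by simp [List.intercalate]⟩
        | cons y u => exact ⟨w' ++ [' '] ++ List.intercalate [' '] (y :: u), by rw [pv_inter_cons₂]; simp⟩
      obtain ⟨rest, hrest⟩ := this
      rw [hrest, PySem.Chars.lstrip, List.dropWhile_cons_of_neg (by simp [hc])]

theorem pv_rev_inter : ∀ (ws : List (List Char)),
    (List.intercalate [' '] ws).reverse = List.intercalate [' '] ((ws.map List.reverse).reverse) := by
  intro ws
  induction ws with
  | nil => rfl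
  | cons w t ih =>
    cases t with
    | nil => simp [List.intercalate]
    | cons y u =>
      rw [pv_inter_cons₂]
      simp only [List.reverse_append, ih]
      rw [show ((w :: y :: u).map List.reverse).reverse
            = ((y :: u).map List.reverse).reverse ++ [w.reverse] by simp]
      rw [pv_inter_append [' '] [w.reverse] (by simp) _ (by simp)]
      simp [List.intercalate]

theorem pv_strip_inter (ws : List (List Char)) (h : ∀ w ∈ ws, pvGood w) :
    PySem.Chars.strip (List.intercalate [' '] ws) = List.intercalate [' '] ws := by
  rw [PySem.Chars.strip, pv_lstrip_inter ws h, PySem.Chars.rstrip, pv_rev_inter]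
  rw [show List.dropWhile PySem.Chars.isspace (List.intercalate [' '] ((ws.map List.reverse).reverse))
        = PySem.Chars.lstrip (List.intercalate [' '] ((ws.map List.reverse).reverse)) from rfl]
  rw [pv_lstrip_inter _ (by
    intro w hw
    rcases List.mem_map.mp (List.mem_reverse.mp hw) with ⟨v, hv, rfl⟩
    obtain ⟨h1, h2⟩ := h v hv
    exact ⟨by simpa using h1, fun c hc => h2 c (List.mem_reverse.mp hc)⟩)]
  rw [← pv_rev_inter, List.reverse_reverse]

theorem pv_filter_ne (s : String) :
    (PySem.Str.split₀ s).filter (fun w => w != "") = PySem.Str.split₀ s := by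
  apply List.filter_eq_self.mpr
  intro w hw
  have hm : w.toList ∈ PySem.Chars.split₀ s.toList := by
    rw [← PySem.Str.split₀_map_toList]; exact List.mem_map_of_mem hw
  have := (pv_split0_words_good s.toList w.toList hm).1
  simp only [bne_iff_ne, ne_eq]
  intro hh; subst hh; simp at this

theorem pv_flatten_filter {α : Type} (wss : List (List α)) :
    (wss.filter (fun ws => !ws.isEmpty)).flatten = wss.flatten := by
  induction wss with
  | nil => rfl
  | cons ws t ih =>
    cases ws with
    | nil => simpa using ih
    | cons a b => simp [ih]

theorem pv_main (ls : List String) :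
    clean_python_docstring_py ls = clean_python_docstring_py_alt ls := by
  apply String.toList_inj.mp
  by_cases hlen : ls.length = 1
  · obtain ⟨l, rfl⟩ := List.length_eq_one_iff.mp hlen
    simp only [clean_python_docstring_py, clean_python_docstring_py_alt, hlen,
      List.headD, beq_self_eq_true, if_true, pv_filter_ne]
    rw [PySem.Str.toList_join, PySem.Str.toList_join]
    rw [show (PySem.Str.split₀ (PySem.Str.join " " [l])).map String.toList
          = PySem.Chars.split₀ (PySem.Str.join " " [l]).toList from PySem.Str.split₀_map_toList _]
    rw [PySem.Str.toList_join]
    rw [show (PySem.Str.split₀ l).map String.toList = PySem.Chars.split₀ l.toList from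
      PySem.Str.split₀_map_toList _]
    simp [PySem.Chars.join, List.intercalate]
  · have hne : (ls.length == 1) = false := by simpa using hlen
    simp only [clean_python_docstring_py, clean_python_docstring_py_alt, hne, Bool.false_eq_true,
      if_false, pv_filter_ne]
    rw [show (ls.foldl (fun acc line =>
        if (PySem.Str.strip line != "") = true then
          acc ++ [PySem.Str.join " " (PySem.Str.split₀ (PySem.Str.strip line))]
        else acc) []) = List.map (fun line => PySem.Str.join " " (PySem.Str.split₀ (PySem.Str.strip line)))
          (List.filter (fun line => PySem.Str.strip line != "") ls) from
      PySem.List.foldl_append_if _ _ ls []]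
    have hsp : " ".toList = [' '] := rfl
    rw [PySem.Str.toList_strip, PySem.Str.toList_join, PySem.Str.toList_join,
      show (PySem.Str.split₀ (PySem.Str.join " " ls)).map String.toList
          = PySem.Chars.split₀ (PySem.Str.join " " ls).toList from PySem.Str.split₀_map_toList _,
      PySem.Str.toList_join, hsp, pv_split0_join, List.map_map]
    have hmap : (String.toList ∘ fun line => PySem.Str.join " " (PySem.Str.split₀ (PySem.Str.strip line)))
        = fun l => PySem.Chars.join [' '] (PySem.Chars.split₀ l.toList) := by
      funext l
      simp only [Function.comp]
      rw [PySem.Str.toList_join, hsp,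
        show (PySem.Str.split₀ (PySem.Str.strip l)).map String.toList
          = PySem.Chars.split₀ (PySem.Str.strip l).toList from PySem.Str.split₀_map_toList _,
        PySem.Str.toList_strip, pv_split0_strip]
    rw [hmap]
    have hfilt : List.filter (fun line => PySem.Str.strip line != "") ls
        = List.filter ((fun ws => !ws.isEmpty) ∘ (fun l => PySem.Chars.split₀ l.toList)) ls := by
      apply List.filter_congr
      intro l _
      simp only [Function.comp]
      by_cases h : ∀ c ∈ l.toList, PySem.Chars.isspace c = true
      · have h1 : PySem.Str.strip l = "" := by
          apply String.toList_inj.mp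
          rw [PySem.Str.toList_strip, String.toList_empty]
          exact (pv_strip_nil_iff l.toList).mpr h
        have h2 : PySem.Chars.split₀ l.toList = [] := (pv_split0_nil_iff l.toList).mpr h
        simp [h1, h2]
      · have h1 : PySem.Str.strip l ≠ "" := by
          intro hh
          exact h ((pv_strip_nil_iff l.toList).mp (by rw [← PySem.Str.toList_strip, hh, String.toList_empty]))
        have h2 : PySem.Chars.split₀ l.toList ≠ [] := fun hh => h ((pv_split0_nil_iff l.toList).mp hh)
        simp [bne_iff_ne, h1, List.isEmpty_eq_false_iff.mpr h2]
    rw [hfilt,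
      show (fun l : String => PySem.Chars.join [' '] (PySem.Chars.split₀ l.toList))
        = (PySem.Chars.join [' '] ∘ fun l : String => PySem.Chars.split₀ l.toList) from rfl,
      ← List.map_map, ← List.filter_map]
    have hj : PySem.Chars.join [' '] = List.intercalate [' '] := funext fun _ => rfl
    simp only [hj]
    have hgood : ∀ ws ∈ List.filter (fun ws => !ws.isEmpty)
        (List.map (fun l : String => PySem.Chars.split₀ l.toList) ls), ws ≠ [] := by
      intro ws hm
      have := List.of_mem_filter hm
      simpa [List.isEmpty_eq_false_iff] using this
    rw [pv_inter_flatten [' '] _ hgood]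
    rw [pv_flatten_filter]
    rw [List.map_map]
    apply pv_strip_inter
    intro w hw
    rcases List.mem_flatten.mp hw with ⟨ws, hws, hwmem⟩
    rcases List.mem_map.mp hws with ⟨l, _, rfl⟩
    exact pv_split0_words_good _ _ hwmem

-- ===== VERDICT (by name: the statement is the Claim_ definition above) =====
theorem clean_python_docstring_py_spec : Claim_equal_clean_python_docstring_py := by
  intro comment_lines _
  exact pv_main comment_lines
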